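-- pv_equiv track=rewrite | github.com/xwxing1229/LeetCode | Python3/3606_coupon_code_validator.py | validateCoupons
-- ===== SOURCE A (Python) =====
-- def validateCoupons(code: list[str], businessLine: list[str], isActive: list[bool]) -> list[str]:
--     business_type = {
--         "electronics": 0,
--         "grocery": 1,
--         "pharmacy": 2,
--         "restaurant": 3,
--     }
--     valid = [[] for _ in range(4)]
--     for i in range(len(code)):
--         if not isActive[i] or businessLine[i] not in business_type:
--             continue
--         if code[i] and all(ch == "_" or ch.isalnum() for ch in code[i]):
--             valid[business_type[businessLine[i]]].append(code[i])
--     res = []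
--     for val in valid:
--         val.sort()
--         res += val
--     return res
-- ===== SOURCE B (Python) =====
-- def validateCoupons(code: list[str], businessLine: list[str], isActive: list[bool]) -> list[str]:
--     business_type = {
--         "electronics": 0,
--         "grocery": 1,
--         "pharmacy": 2,
--         "restaurant": 3,
--     }
--     pairs = []
--     for cat, c, act in zip(businessLine, code, isActive):
--         if act and cat in business_type and c and all(ch == "_" or ch.isalnum() for ch in c):
--             pairs.append((business_type[cat], c))
--     pairs.sort()
--     return [c for _, c in pairs]
-- ===== Notes on version B (the rewrite author's own statement) =====
-- stated objective: simpler
-- what changed: B replaces A's four per-category bucket lists, four separate sorts and concatenation by one pass over zip(businessLine, code, isActive) collecting (category_rank, code) pairs and a single stable sort on the composite tuple key.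
import Mathlib
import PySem

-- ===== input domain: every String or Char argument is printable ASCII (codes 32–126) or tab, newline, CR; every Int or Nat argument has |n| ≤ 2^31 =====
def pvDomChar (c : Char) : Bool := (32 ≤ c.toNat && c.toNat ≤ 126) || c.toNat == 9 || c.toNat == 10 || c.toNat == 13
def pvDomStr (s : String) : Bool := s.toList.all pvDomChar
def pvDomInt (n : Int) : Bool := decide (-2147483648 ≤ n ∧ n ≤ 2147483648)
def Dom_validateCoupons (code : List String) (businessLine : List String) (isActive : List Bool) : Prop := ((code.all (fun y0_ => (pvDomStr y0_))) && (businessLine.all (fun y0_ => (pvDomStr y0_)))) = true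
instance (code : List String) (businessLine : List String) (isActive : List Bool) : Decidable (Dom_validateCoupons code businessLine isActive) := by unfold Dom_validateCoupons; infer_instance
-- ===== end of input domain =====

-- B replaces A's four per-category buckets + four sorts + concatenation by one pass that
-- collects (category_rank, code) pairs and one stable sort on the composite key (objective: simpler).

-- shared helper: the business_type dict literal both Pythons define
def businessType : PySem.Dict String Int :=
  ((((PySem.Dict.empty).insert "electronics" 0).insert "grocery" 1).insert "pharmacy" 2).insert "restaurant" 3

-- shared helper: Python's `code[i] and all(ch == "_" or ch.isalnum() for ch in code[i])`
def validCode (c : String) : Bool :=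
  (!(c == "")) && c.toList.all (fun ch => ch == '_' || PySem.Chars.isalnum ch)

-- ===== PORT A =====
def validateCoupons (code : List String) (businessLine : List String) (isActive : List Bool) : List String :=
  let valid0 : List (List String) := (List.range 4).map (fun _ => ([] : List String))
  let valid := (PySem.List.pyRange 0 (PySem.List.len code)).foldl (fun valid i =>
      if !(PySem.List.pyGetD isActive i false)
          || !(businessType.get? (PySem.List.pyGetD businessLine i "")).isSome then valid
      else
        let c := PySem.List.pyGetD code i ""
        if validCode c then
          let k := ((businessType.get? (PySem.List.pyGetD businessLine i "")).getD 0).toNat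
          valid.set k (valid.getD k [] ++ [c])
        else valid) valid0
  valid.foldl (fun res val => res ++ PySem.List.sorted val (fun x => x) false) []

-- ===== PORT B =====
def validateCoupons_alt (code : List String) (businessLine : List String) (isActive : List Bool) : List String :=
  let pairs : List (Int × String) := (businessLine.zip (code.zip isActive)).foldl
      (fun acc t =>
        if t.2.2 && (businessType.get? t.1).isSome && validCode t.2.1 then
          acc ++ [((businessType.get? t.1).getD 0, t.2.1)]
        else acc) []
  (PySem.List.sorted2 pairs Prod.fst Prod.snd false).map Prod.snd

-- ===== PRECONDITION & SPEC =====
-- Pre_ excludes exactly the inputs on which A raises IndexError: an index i < len(code) at which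
-- isActive[i] is missing, or at which isActive[i] is True but businessLine[i] is missing.
def Pre_validateCoupons (code : List String) (businessLine : List String) (isActive : List Bool) : Prop :=
  code.length ≤ isActive.length ∧
    ∀ i ∈ List.range code.length, businessLine.length ≤ i → isActive.getD i false = false
instance (code : List String) (businessLine : List String) (isActive : List Bool) : Decidable (Pre_validateCoupons code businessLine isActive) := by unfold Pre_validateCoupons; infer_instance

def pvWitness_validateCoupons : List String × List String × List Bool :=
  (["AB_3", "x!", "z9"], ["grocery", "grocery", "electronics"], [true, true, true])

def Spec_validateCoupons (code : List String) (businessLine : List String) (isActive : List Bool) (out : List String) : Prop := out = validateCoupons_alt code businessLine isActive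
instance (code : List String) (businessLine : List String) (isActive : List Bool) (out : List String) : Decidable (Spec_validateCoupons code businessLine isActive out) := by unfold Spec_validateCoupons; infer_instance

-- ===== CLAIM (what is proved, stated in full; the proofs are below) =====
def Claim_equal_validateCoupons : Prop := ∀ (code : List String) (businessLine : List String) (isActive : List Bool), Dom_validateCoupons code businessLine isActive → Pre_validateCoupons code businessLine isActive → Spec_validateCoupons code businessLine isActive (validateCoupons code businessLine isActive)


-- ===== LEMMAS AND PROOFS =====

-- the rank a valid category string gets
def rankOf (cat : String) : Int := (businessType.get? cat).getD 0

-- the filter both loops apply to one zipped triple (cat, c, act)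
def okT (t : String × String × Bool) : Bool :=
  t.2.2 && (businessType.get? t.1).isSome && validCode t.2.1

-- the pair list B builds
def pairsOf (code : List String) (businessLine : List String) (isActive : List Bool) : List (Int × String) :=
  ((businessLine.zip (code.zip isActive)).filter okT).map (fun t => (rankOf t.1, t.2.1))

-- bucket k of A
def bucketOf (k : Int) (Z : List (String × String × Bool)) : List String :=
  ((Z.filter okT).filter (fun t => rankOf t.1 == k)).map (fun t => t.2.1)

lemma rankOf_cases (cat : String) (h : (businessType.get? cat).isSome = true) :
    rankOf cat = 0 ∨ rankOf cat = 1 ∨ rankOf cat = 2 ∨ rankOf cat = 3 := by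
  have hmem : cat = "electronics" ∨ cat = "grocery" ∨ cat = "pharmacy" ∨ cat = "restaurant" := by
    by_contra hc
    push_neg at hc
    obtain ⟨a, b, c, d⟩ := hc
    rw [show businessType = PySem.Dict.mk [("electronics", 0), ("grocery", 1), ("pharmacy", 2), ("restaurant", 3)] from rfl] at h
    simp only [PySem.Dict.get?, List.find?] at h
    rw [show (("electronics" : String) == cat) = false from by simp [Ne.symm a],
        show (("grocery" : String) == cat) = false from by simp [Ne.symm b],
        show (("pharmacy" : String) == cat) = false from by simp [Ne.symm c],
        show (("restaurant" : String) == cat) = false from by simp [Ne.symm d]] at h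
    simp at h
  rcases hmem with rfl | rfl | rfl | rfl <;> decide

-- A's step on a zipped triple
def stepA (valid : List (List String)) (t : String × String × Bool) : List (List String) :=
  if !t.2.2 || !(businessType.get? t.1).isSome then valid
  else if validCode t.2.1 then
    let k := (rankOf t.1).toNat
    valid.set k (valid.getD k [] ++ [t.2.1])
  else valid

lemma foldl_stepA_buckets (Z : List (String × String × Bool)) :
    ∀ v0 v1 v2 v3 : List String,
      Z.foldl stepA [v0, v1, v2, v3] =
        [v0 ++ bucketOf 0 Z, v1 ++ bucketOf 1 Z, v2 ++ bucketOf 2 Z, v3 ++ bucketOf 3 Z] := by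
  induction Z with
  | nil => intro v0 v1 v2 v3; simp [bucketOf]
  | cons t Z ih =>
    intro v0 v1 v2 v3
    obtain ⟨cat, c, act⟩ := t
    simp only [List.foldl_cons]
    by_cases hok : okT (cat, c, act) = true
    · have h3 := hok
      simp only [okT, Bool.and_eq_true] at h3
      obtain ⟨⟨ha, hs⟩, hv⟩ := h3
      have hb : ∀ k, bucketOf k ((cat, c, act) :: Z) =
          (if rankOf cat == k then [c] else []) ++ bucketOf k Z := by
        intro k
        simp only [bucketOf, List.filter_cons, hok, if_true]
        by_cases hk : (rankOf cat == k) = true <;> simp [hk]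
      rcases rankOf_cases cat hs with hr | hr | hr | hr
      · have hstep : stepA [v0, v1, v2, v3] (cat, c, act) = [v0 ++ [c], v1, v2, v3] := by
          simp [stepA, ha, hs, hv, hr]
        rw [hstep, ih]
        simp [hb, hr, List.append_assoc]
      · have hstep : stepA [v0, v1, v2, v3] (cat, c, act) = [v0, v1 ++ [c], v2, v3] := by
          simp [stepA, ha, hs, hv, hr]
        rw [hstep, ih]
        simp [hb, hr, List.append_assoc]
      · have hstep : stepA [v0, v1, v2, v3] (cat, c, act) = [v0, v1, v2 ++ [c], v3] := by
          simp [stepA, ha, hs, hv, hr]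
        rw [hstep, ih]
        simp [hb, hr, List.append_assoc]
      · have hstep : stepA [v0, v1, v2, v3] (cat, c, act) = [v0, v1, v2, v3 ++ [c]] := by
          simp [stepA, ha, hs, hv, hr]
        rw [hstep, ih]
        simp [hb, hr, List.append_assoc]
    · have hstep : stepA [v0, v1, v2, v3] (cat, c, act) = [v0, v1, v2, v3] := by
        by_cases ha : act = true <;> by_cases hs : (businessType.get? cat).isSome = true <;>
          by_cases hv : validCode c = true <;> simp_all [stepA, okT]
      have hb : ∀ k, bucketOf k ((cat, c, act) :: Z) = bucketOf k Z := by
        intro k; simp [bucketOf, List.filter_cons, hok]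
      rw [hstep, ih]
      simp [hb]

-- a fold over range n whose trailing steps are identities is a fold over range m
lemma foldl_range_tail_id {σ : Type} (f : σ → ℕ → σ) :
    ∀ (n m : ℕ), m ≤ n → (∀ s i, m ≤ i → i < n → f s i = s) → ∀ s : σ,
      (List.range n).foldl f s = (List.range m).foldl f s := by
  intro n
  induction n with
  | zero => intro m hm _ s; have : m = 0 := Nat.le_zero.mp hm; subst this; rfl
  | succ k ih =>
    intro m hm hid s
    by_cases hmk : m = k + 1
    · subst hmk; rfl
    · rw [List.range_succ, List.foldl_append]
      simp only [List.foldl_cons, List.foldl_nil]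
      rw [hid _ k (by omega) (by omega)]
      exact ih m (by omega) (fun s i h1 h2 => hid s i h1 (by omega)) s

-- a fold over range m indexing three lists is a fold over their zip
lemma foldl_range_getD_zip3 {σ : Type} (g : σ → String × String × Bool → σ)
    (bl code : List String) (act : List Bool) :
    ∀ (m : ℕ), m ≤ bl.length → m ≤ code.length → m ≤ act.length → ∀ s : σ,
      (List.range m).foldl (fun s i => g s (bl.getD i "", code.getD i "", act.getD i false)) s
        = ((bl.zip (code.zip act)).take m).foldl g s := by
  intro m
  induction m with
  | zero => intro _ _ _ s; simp
  | succ k ih =>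
    intro h1 h2 h3 s
    have hk : k < (bl.zip (code.zip act)).length := by
      simp [List.length_zip]; omega
    rw [List.range_succ, List.foldl_append, ih (by omega) (by omega) (by omega),
        List.take_add_one]
    have hget : (bl.zip (code.zip act))[k]? = some (bl[k]'(by omega), (code[k]'(by omega), act[k]'(by omega))) := by
      rw [List.getElem?_eq_getElem hk]
      simp [List.getElem_zip]
    rw [hget, List.foldl_append]
    simp [List.getD_eq_getElem, List.getD_eq_getElem?_getD, List.getElem?_eq_getElem,
      (by omega : k < bl.length), (by omega : k < code.length), (by omega : k < act.length)]

-- fold over pyRange with pyGetD indexing = fold over the zip, under Pre_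
lemma foldl_pyRange_eq_foldl_zip3 {σ : Type} (g : σ → String × String × Bool → σ)
    (hg : ∀ s cat c, g s (cat, c, false) = s)
    (code businessLine : List String) (isActive : List Bool) (s : σ)
    (h1 : code.length ≤ isActive.length)
    (h2 : ∀ i ∈ List.range code.length, businessLine.length ≤ i → isActive.getD i false = false) :
    (PySem.List.pyRange 0 (PySem.List.len code)).foldl
      (fun s i => g s (PySem.List.pyGetD businessLine i "", PySem.List.pyGetD code i "",
        PySem.List.pyGetD isActive i false)) s
      = (businessLine.zip (code.zip isActive)).foldl g s := by
  have hlen : PySem.List.len code = ((code.length : ℕ) : ℤ) := rfl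
  rw [hlen, PySem.List.pyRange_zero_natCast, List.foldl_map]
  simp only [PySem.List.pyGetD_natCast]
  have hm : min businessLine.length code.length ≤ code.length := by omega
  rw [foldl_range_tail_id _ code.length (min businessLine.length code.length) hm
      (by
        intro s i hmi hin
        have hbl : businessLine.length ≤ i := by omega
        have hfalse : isActive.getD i false = false :=
          h2 i (List.mem_range.mpr hin) hbl
        rw [hfalse]
        exact hg _ _ _)]
  rw [foldl_range_getD_zip3 g businessLine code isActive _ (by omega) (by omega) (by omega)]
  congr 1
  have : (businessLine.zip (code.zip isActive)).length = min businessLine.length code.length := by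
    simp [List.length_zip]; omega
  rw [List.take_of_length_le (by omega)]

-- the composite sort key of B, as a lexicographic linear order
def lexKey (p : Int × String) : Int ×ₗ String := toLex p

lemma lexKey_inj : Function.Injective lexKey := fun _ _ h => toLex.injective h

lemma before_lex_eq :
    (fun (a b : Int × String) => decide (a.1 < b.1) || (!decide (b.1 < a.1) && decide (a.2 < b.2)))
      = fun a b => decide (lexKey a < lexKey b) := by
  funext a b
  rcases lt_trichotomy a.1 b.1 with h | h | h
  · simp [lexKey, Prod.Lex.toLex_lt_toLex, h, lt_asymm h]
  · simp [lexKey, Prod.Lex.toLex_lt_toLex, h, lt_irrefl]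
  · simp [lexKey, Prod.Lex.toLex_lt_toLex, h, lt_asymm h, ne_of_gt h]

-- Python's tuple sort IS the sort by the lexicographic key
lemma sorted2_eq_sorted_lexKey (L : List (Int × String)) :
    PySem.List.sorted2 L Prod.fst Prod.snd false = PySem.List.sorted L lexKey false := by
  show L.foldl (fun acc x => PySem.List.insertBy
        (fun a b => decide (a.1 < b.1) || (!decide (b.1 < a.1) && decide (a.2 < b.2))) x acc) []
      = L.foldl (fun acc x => PySem.List.insertBy (fun a b => decide (lexKey a < lexKey b)) x acc) []
  rw [before_lex_eq]

lemma map_pair_snd (k : Int) :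
    ∀ M : List (Int × String), (∀ p ∈ M, p.1 = k) → (M.map Prod.snd).map (fun s => (k, s)) = M := by
  intro M
  induction M with
  | nil => intro _; rfl
  | cons p M ih =>
    intro h
    obtain ⟨a, b⟩ := p
    have ha : a = k := h (a, b) List.mem_cons_self
    subst ha
    simp only [List.map_cons]
    rw [ih (fun q hq => h q (List.mem_cons_of_mem _ hq))]

-- the four filters partition L when every rank is in {0,1,2,3}
lemma perm_partition4 (L : List (Int × String))
    (hL : ∀ p ∈ L, p.1 = 0 ∨ p.1 = 1 ∨ p.1 = 2 ∨ p.1 = 3) :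
    L.Perm (((L.filter (fun p => p.1 == 0) ++ L.filter (fun p => p.1 == 1)) ++
      L.filter (fun p => p.1 == 2)) ++ L.filter (fun p => p.1 == 3)) := by
  rw [List.perm_iff_count]
  intro x
  by_cases hx : x ∈ L
  · have hz : ∀ k : Int, x.1 ≠ k → List.count x (L.filter (fun p => p.1 == k)) = 0 := by
      intro k hk
      rw [List.count_eq_zero]
      intro hmem
      exact hk (by simpa using List.of_mem_filter hmem)
    have hc : ∀ k : Int, x.1 = k → List.count x (L.filter (fun p => p.1 == k)) = List.count x L :=
      fun k hk => List.count_filter (by simp [hk])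
    rcases hL x hx with h | h | h | h <;>
      simp [List.count_append, h, hc _ h, hz]
  · have hz : ∀ k : Int, List.count x (L.filter (fun p => p.1 == k)) = 0 := by
      intro k
      rw [List.count_eq_zero]
      intro hmem
      exact hx (List.mem_of_mem_filter hmem)
    simp [List.count_append, hz, List.count_eq_zero.mpr hx]

-- the k-th output segment, as strings and as pairs
def Tk (L : List (Int × String)) (k : Int) : List String :=
  PySem.List.sorted ((L.filter (fun p => p.1 == k)).map Prod.snd) (fun x => x) false

def blockk (L : List (Int × String)) (k : Int) : List (Int × String) :=
  (Tk L k).map (fun s => (k, s))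

lemma filter_fst_eq (k : Int) (L : List (Int × String)) :
    ∀ p ∈ L.filter (fun p => p.1 == k), p.1 = k := by
  intro p hp
  simpa using List.of_mem_filter hp

lemma block_perm_filter (L : List (Int × String)) (k : Int) :
    (blockk L k).Perm (L.filter (fun p => p.1 == k)) := by
  have h1 : (Tk L k).Perm ((L.filter (fun p => p.1 == k)).map Prod.snd) :=
    PySem.List.sorted_perm _ _ _
  have h2 := h1.map (fun s => ((k : Int), s))
  rwa [map_pair_snd k _ (filter_fst_eq k L)] at h2

lemma block_pairwise (L : List (Int × String)) (k : Int) :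
    (blockk L k).Pairwise (fun a b => lexKey a ≤ lexKey b) := by
  unfold blockk
  rw [List.pairwise_map]
  refine (PySem.List.sorted_pairwise ((L.filter (fun p => p.1 == k)).map Prod.snd) (fun x => x)).imp ?_
  intro a b h
  rw [lexKey, lexKey, Prod.Lex.toLex_le_toLex]
  exact Or.inr ⟨rfl, h⟩

lemma block_fst (L : List (Int × String)) (k : Int) :
    ∀ x ∈ blockk L k, x.1 = k := by
  intro x hx
  rcases List.mem_map.mp hx with ⟨s, _, rfl⟩
  rfl

lemma block_cross (L : List (Int × String)) (k k' : Int) (hkk : k < k') :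
    ∀ a ∈ blockk L k, ∀ b ∈ blockk L k', lexKey a ≤ lexKey b := by
  intro a ha b hb
  rw [lexKey, lexKey, Prod.Lex.toLex_le_toLex]
  left
  rw [block_fst L k a ha, block_fst L k' b hb]
  exact hkk

lemma main_sort (L : List (Int × String))
    (hL : ∀ p ∈ L, p.1 = 0 ∨ p.1 = 1 ∨ p.1 = 2 ∨ p.1 = 3) :
    (PySem.List.sorted2 L Prod.fst Prod.snd false).map Prod.snd =
      PySem.List.sorted ((L.filter (fun p => p.1 == 0)).map Prod.snd) (fun x => x) false ++
      PySem.List.sorted ((L.filter (fun p => p.1 == 1)).map Prod.snd) (fun x => x) false ++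
      PySem.List.sorted ((L.filter (fun p => p.1 == 2)).map Prod.snd) (fun x => x) false ++
      PySem.List.sorted ((L.filter (fun p => p.1 == 3)).map Prod.snd) (fun x => x) false := by
  have hys : ((((blockk L 0 ++ blockk L 1) ++ blockk L 2) ++ blockk L 3)).Pairwise
      (fun a b => lexKey a ≤ lexKey b) := by
    refine List.pairwise_append.mpr ⟨List.pairwise_append.mpr ⟨List.pairwise_append.mpr
      ⟨block_pairwise L 0, block_pairwise L 1, block_cross L 0 1 (by norm_num)⟩,
      block_pairwise L 2, ?_⟩, block_pairwise L 3, ?_⟩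
    · intro a ha b hb
      rcases List.mem_append.mp ha with h | h
      · exact block_cross L 0 2 (by norm_num) a h b hb
      · exact block_cross L 1 2 (by norm_num) a h b hb
    · intro a ha b hb
      rcases List.mem_append.mp ha with h | h
      · rcases List.mem_append.mp h with h' | h'
        · exact block_cross L 0 3 (by norm_num) a h' b hb
        · exact block_cross L 1 3 (by norm_num) a h' b hb
      · exact block_cross L 2 3 (by norm_num) a h b hb
  have hperm : (PySem.List.sorted L lexKey false).Perm
      (((blockk L 0 ++ blockk L 1) ++ blockk L 2) ++ blockk L 3) := by
    refine (PySem.List.sorted_perm L lexKey false).trans ((perm_partition4 L hL).trans ?_)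
    exact ((((block_perm_filter L 0).append (block_perm_filter L 1)).append
      (block_perm_filter L 2)).append (block_perm_filter L 3)).symm
  have heq : PySem.List.sorted L lexKey false =
      ((blockk L 0 ++ blockk L 1) ++ blockk L 2) ++ blockk L 3 :=
    PySem.List.eq_of_perm_of_pairwise_le_of_injective lexKey lexKey_inj hperm
      (PySem.List.sorted_pairwise L lexKey) hys
  rw [sorted2_eq_sorted_lexKey, heq]
  simp [blockk, Tk, List.map_append, List.map_map, Function.comp]

-- ===== VERDICT (by name: the statement is the Claim_ definition above) =====
theorem validateCoupons_spec : Claim_equal_validateCoupons := by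
  intro code businessLine isActive _ hpre
  unfold Spec_validateCoupons
  obtain ⟨h1, h2⟩ := hpre
  have hstepid : ∀ (s : List (List String)) cat c, stepA s (cat, c, false) = s := by
    intro s cat c; simp [stepA]
  have hA : validateCoupons code businessLine isActive
      = ((businessLine.zip (code.zip isActive)).foldl stepA [[], [], [], []]).foldl
          (fun res val => res ++ PySem.List.sorted val (fun x => x) false) [] := by
    show ((PySem.List.pyRange 0 (PySem.List.len code)).foldl
        (fun s i => stepA s (PySem.List.pyGetD businessLine i "", PySem.List.pyGetD code i "",
          PySem.List.pyGetD isActive i false)) [[], [], [], []]).foldl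
        (fun res val => res ++ PySem.List.sorted val (fun x => x) false) [] = _
    rw [foldl_pyRange_eq_foldl_zip3 stepA hstepid code businessLine isActive _ h1 h2]
  have hB : validateCoupons_alt code businessLine isActive
      = (PySem.List.sorted2 (pairsOf code businessLine isActive) Prod.fst Prod.snd false).map
          Prod.snd := by
    show (PySem.List.sorted2 ((businessLine.zip (code.zip isActive)).foldl
        (fun acc t => if okT t then acc ++ [(rankOf t.1, t.2.1)] else acc) [])
        Prod.fst Prod.snd false).map Prod.snd = _
    rw [PySem.List.foldl_append_if okT (fun t => (rankOf t.1, t.2.1)) _ []]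
    rfl
  have hL : ∀ p ∈ pairsOf code businessLine isActive, p.1 = 0 ∨ p.1 = 1 ∨ p.1 = 2 ∨ p.1 = 3 := by
    intro p hp
    rcases List.mem_map.mp hp with ⟨t, ht, rfl⟩
    have hok := List.of_mem_filter ht
    simp only [okT, Bool.and_eq_true] at hok
    exact rankOf_cases t.1 hok.1.2
  have hseg : ∀ k : Int,
      ((pairsOf code businessLine isActive).filter (fun p => p.1 == k)).map Prod.snd
        = bucketOf k (businessLine.zip (code.zip isActive)) := by
    intro k
    unfold pairsOf bucketOf
    rw [List.filter_map, List.map_map]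
    rfl
  rw [hA, foldl_stepA_buckets, hB, main_sort _ hL, hseg 0, hseg 1, hseg 2, hseg 3]
  simp [List.append_assoc]
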